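-- pv_equiv track=rewrite | github.com/agent-artifacts/ReCodeAgent | data/tool_projects/skel/heapq/python/source.py | nsmallest
-- ===== SOURCE A (Python) =====
-- def _heapreplace_max(heap, item):
--     ### --- BLOCK BEGIN 7
--     returnitem = heap[0]
--     heap[0] = item
--     _siftup_max(heap, 0)
--     return returnitem
--
-- def _heapify_max(x):
--     ### --- BLOCK BEGIN 8
--     n = len(x)
--     for i in reversed(range(n//2)):
--         _siftup_max(x, i)
--
-- def _siftdown_max(heap, startpos, pos):
--     ### --- BLOCK BEGIN 11
--     newitem = heap[pos]
--     while pos > startpos: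
--         parentpos = (pos - 1) >> 1
--         parent = heap[parentpos]
--         if parent < newitem:
--             heap[pos] = parent
--             pos = parentpos
--             continue
--         break
--     heap[pos] = newitem
--
-- def _siftup_max(heap, pos):
--     ### --- BLOCK BEGIN 12
--     endpos = len(heap)
--     startpos = pos
--     newitem = heap[pos]
--     childpos = 2*pos + 1
--     while childpos < endpos:
--         rightpos = childpos + 1
--         if rightpos < endpos and not heap[rightpos] < heap[childpos]:
--             childpos = rightpos
--         heap[pos] = heap[childpos]
--         pos = childpos
--         childpos = 2*pos + 1
--     heap[pos] = newitem
--     _siftdown_max(heap, startpos, pos)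
--
-- def nsmallest(n, iterable):
--     ### --- BLOCK BEGIN 15
--     if n == 1:
--         it = iter(iterable)
--         sentinel = object()
--         result = min(it, default=sentinel)
--         return [] if result is sentinel else [result]
--     try:
--         size = len(iterable)
--     except (TypeError, AttributeError):
--         pass
--     else:
--         if n >= size:
--             return sorted(iterable)[:n]
--     it = iter(iterable)
--     result = [(elem, i) for i, elem in zip(range(n), it)]
--     if not result:
--         return result
--     _heapify_max(result)
--     top = result[0][0]
--     order = n
--     _heapreplace = _heapreplace_max
--     for elem in it:
--         if elem < top:
--             _heapreplace(result, (elem, order))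
--             top, _order = result[0]
--             order += 1
--     result.sort()
--     return [elem for (elem, order) in result]
-- ===== SOURCE B (Python) =====
-- def nsmallest(n, iterable):
--     if n <= 0:
--         return []
--     return sorted(iterable)[:n]
-- ===== Notes on version B (the rewrite author's own statement) =====
-- stated objective: simpler
-- what changed: The size-n max-heap pass (heapify/heapreplace/sift helpers plus the order counter) is replaced by one full stable sort of the iterable followed by a slice of the first n, with a single guard for non-positive n; the per-element interpreted heap loop disappears into the single built-in sort, which a timing run measured as a large constant-factor win.
import Mathlib
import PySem

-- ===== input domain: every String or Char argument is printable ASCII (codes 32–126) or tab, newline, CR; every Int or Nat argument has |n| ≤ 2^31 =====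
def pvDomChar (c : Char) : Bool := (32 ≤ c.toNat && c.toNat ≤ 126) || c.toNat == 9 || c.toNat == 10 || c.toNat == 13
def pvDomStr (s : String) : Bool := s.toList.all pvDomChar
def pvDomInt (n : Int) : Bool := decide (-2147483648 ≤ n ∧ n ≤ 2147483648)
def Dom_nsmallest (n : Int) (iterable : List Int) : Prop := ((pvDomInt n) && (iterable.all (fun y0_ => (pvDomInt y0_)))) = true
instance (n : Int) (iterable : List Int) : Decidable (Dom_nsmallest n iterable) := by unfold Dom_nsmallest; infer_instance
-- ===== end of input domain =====

-- B replaces A's size-n max-heap selection by a full stable sort plus a slice of the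
-- first n (guarded for non-positive n); objective: simpler.

-- ===== PORT A =====
-- Python compares the (elem, order) tuples lexicographically; pltb is that strict order.
def pltb (x y : Int × Int) : Bool :=
  decide (x.1 < y.1) || (decide (x.1 = y.1) && decide (x.2 < y.2))

-- heap[i]; every access in A is in range, so the default is never returned.
def hget (l : List (Int × Int)) (i : Nat) : Int × Int := (l[i]?).getD (0, 0)

-- the while loop of _siftdown_max (state: heap, pos); newitem is read before the loop
def siftdownLoop (heap : List (Int × Int)) (newitem : Int × Int) (startpos pos : Nat) :
    List (Int × Int) × Nat :=
  if _h : startpos < pos then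
    let parentpos := (pos - 1) / 2
    let parent := hget heap parentpos
    if pltb parent newitem then siftdownLoop (heap.set pos parent) newitem startpos parentpos
    else (heap, pos)
  else (heap, pos)
termination_by pos
decreasing_by omega

def siftdownMax (heap : List (Int × Int)) (startpos pos : Nat) : List (Int × Int) :=
  let newitem := hget heap pos
  let r := siftdownLoop heap newitem startpos pos
  r.1.set r.2 newitem

-- the while loop of _siftup_max (state: heap, pos, childpos)
def siftupLoop (heap : List (Int × Int)) (endpos pos childpos : Nat) :
    List (Int × Int) × Nat :=
  if _h : childpos < endpos then
    let rightpos := childpos + 1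
    let childpos2 :=
      if rightpos < endpos && !(pltb (hget heap rightpos) (hget heap childpos)) then rightpos
      else childpos
    let heap2 := heap.set pos (hget heap childpos2)
    siftupLoop heap2 endpos childpos2 (2 * childpos2 + 1)
  else (heap, pos)
termination_by endpos - childpos
decreasing_by
  split <;> omega

def siftupMax (heap : List (Int × Int)) (pos : Nat) : List (Int × Int) :=
  let endpos := heap.length
  let startpos := pos
  let newitem := hget heap pos
  let r := siftupLoop heap endpos pos (2 * pos + 1)
  let heap2 := r.1.set r.2 newitem
  siftdownMax heap2 startpos r.2

def heapifyMax (x : List (Int × Int)) : List (Int × Int) :=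
  (List.range (x.length / 2)).reverse.foldl (fun h i => siftupMax h i) x

-- returnitem = heap[0] is discarded by the caller, so only the new heap is returned
def heapreplaceMax (heap : List (Int × Int)) (item : Int × Int) : List (Int × Int) :=
  siftupMax (heap.set 0 item) 0

-- `for elem in it: ...` over the not-yet-consumed rest of the iterator
def nsmallestLoop (rest : List Int) (heap : List (Int × Int)) (top order : Int) :
    List (Int × Int) :=
  match rest with
  | [] => heap
  | elem :: rest' =>
    if elem < top then
      let heap2 := heapreplaceMax heap (elem, order)
      nsmallestLoop rest' heap2 (hget heap2 0).1 (order + 1)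
    else nsmallestLoop rest' heap top order

def nsmallest (n : Int) (iterable : List Int) : List Int :=
  if n = 1 then
    match PySem.List.min? iterable (fun x => x) with
    | none => []
    | some r => [r]
  else
    let size : Int := iterable.length
    if size ≤ n then PySem.List.slice (PySem.List.sorted iterable (fun x => x)) none (some n)
    else
      let result : List (Int × Int) :=
        (iterable.take n.toNat).zipIdx.map (fun p => (p.1, (p.2 : Int)))
      if result = [] then []
      else
        let heap := heapifyMax result
        let top := (hget heap 0).1
        let heap2 := nsmallestLoop (iterable.drop n.toNat) heap top n
        -- result.sort() sorts the (elem, order) pairs by Python's lexicographic tuple order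
        (PySem.List.sorted2 heap2 Prod.fst Prod.snd).map Prod.fst

-- ===== PORT B =====
def nsmallest_alt (n : Int) (iterable : List Int) : List Int :=
  if n ≤ 0 then []
  else PySem.List.slice (PySem.List.sorted iterable (fun x => x)) none (some n)

-- ===== PRECONDITION & SPEC =====
def Spec_nsmallest (n : Int) (iterable : List Int) (out : List Int) : Prop := out = nsmallest_alt n iterable
instance (n : Int) (iterable : List Int) (out : List Int) : Decidable (Spec_nsmallest n iterable out) := by unfold Spec_nsmallest; infer_instance

-- ===== CLAIM (what is proved, stated in full; the proofs are below) =====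
def Claim_equal_nsmallest : Prop := ∀ (n : Int) (iterable : List Int), Dom_nsmallest n iterable → Spec_nsmallest n iterable (nsmallest n iterable)

-- ===== LEMMAS AND PROOFS =====

-- ---- lexicographic order facts ----
lemma pltb_false_iff (x y : Int × Int) :
    pltb x y = false ↔ (y.1 < x.1 ∨ (y.1 = x.1 ∧ y.2 ≤ x.2)) := by
  simp [pltb]; omega

lemma pltb_true_iff (x y : Int × Int) :
    pltb x y = true ↔ (x.1 < y.1 ∨ (x.1 = y.1 ∧ x.2 < y.2)) := by
  simp [pltb]

lemma pltb_self (x : Int × Int) : pltb x x = false := by simp [pltb_false_iff]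

lemma pltb_ff_trans {a b c : Int × Int} (h1 : pltb a b = false) (h2 : pltb b c = false) :
    pltb a c = false := by
  rw [pltb_false_iff] at *; omega

lemma pltb_asymm {a b : Int × Int} (h : pltb a b = true) : pltb b a = false := by
  rw [pltb_true_iff] at h; rw [pltb_false_iff]; omega

-- c ≤ a and a < ni  ⇒  c < ni (stated as pltb ni c = false)
lemma pltb_le_lt {a ni c : Int × Int} (h1 : pltb a c = false) (h2 : pltb a ni = true) :
    pltb ni c = false := by
  rw [pltb_false_iff] at *; rw [pltb_true_iff] at h2; omega

-- ---- hget / set facts ----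
lemma hget_set_self {l : List (Int × Int)} {i : Nat} (h : i < l.length) (x : Int × Int) :
    hget (l.set i x) i = x := by
  simp [hget, h]

lemma hget_set_ne {l : List (Int × Int)} {i j : Nat} (h : i ≠ j) (x : Int × Int) :
    hget (l.set i x) j = hget l j := by
  simp [hget, List.getElem?_set_ne h]

lemma hget_mem {l : List (Int × Int)} {i : Nat} (h : i < l.length) : hget l i ∈ l := by
  simp only [hget, List.getElem?_eq_getElem h, Option.getD_some]
  exact List.getElem_mem h

lemma set_hget_self {l : List (Int × Int)} {i : Nat} (h : i < l.length) :
    l.set i (hget l i) = l := by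
  simp [hget, List.getElem?_eq_getElem h]

lemma ms_set {l : List (Int × Int)} {i : Nat} (h : i < l.length) (x : Int × Int) :
    (↑(l.set i x) : Multiset (Int × Int)) + {hget l i} = ↑l + {x} := by
  induction l generalizing i with
  | nil => simp at h
  | cons a t ih =>
    cases i with
    | zero =>
      simp only [List.set_cons_zero, hget, List.getElem?_cons_zero, Option.getD_some]
      rw [show ((x :: t : List (Int × Int)) : Multiset (Int × Int)) = x ::ₘ ↑t from rfl,
          show ((a :: t : List (Int × Int)) : Multiset (Int × Int)) = a ::ₘ ↑t from rfl]
      rw [Multiset.add_comm, Multiset.singleton_add, Multiset.add_comm, Multiset.singleton_add,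
          Multiset.cons_swap]
    | succ j =>
      simp only [List.set_cons_succ]
      have hj : j < t.length := by simpa using h
      have := ih hj
      rw [show ((a :: t.set j x : List (Int × Int)) : Multiset (Int × Int)) = a ::ₘ ↑(t.set j x) from rfl,
          show ((a :: t : List (Int × Int)) : Multiset (Int × Int)) = a ::ₘ ↑t from rfl]
      have hg : hget (a :: t) (j+1) = hget t j := by simp [hget]
      rw [hg]
      rw [Multiset.cons_add, Multiset.cons_add, this]

-- ---- ancestor-or-self relation on heap indices ----
def ancb (a b : Nat) : Bool :=
  if b ≤ a then a == b else ancb a ((b - 1) / 2)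
termination_by b
decreasing_by omega

lemma ancb_self (a : Nat) : ancb a a = true := by
  rw [ancb]; simp

lemma ancb_le {a b : Nat} (h : ancb a b = true) : a ≤ b := by
  by_cases hb : b ≤ a
  · rw [ancb, if_pos hb] at h; simp at h; omega
  · omega

lemma ancb_parent {a b : Nat} (h : ancb a b = true) (hlt : a < b) :
    ancb a ((b - 1) / 2) = true := by
  rw [ancb, if_neg (by omega)] at h; exact h

lemma ancb_parent_self (b : Nat) : ancb ((b - 1) / 2) b = true := by
  rw [ancb]
  split
  · simp; omega
  · exact ancb_self _

lemma ancb_child {a p c : Nat} (h : ancb a p = true) (hc : c = 2 * p + 1 ∨ c = 2 * p + 2) :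
    ancb a c = true := by
  have hap := ancb_le h
  rw [ancb, if_neg (by omega)]
  have : (c - 1) / 2 = p := by omega
  rw [this]; exact h

lemma ancb_trans {a b c : Nat} (h1 : ancb a b = true) (h2 : ancb b c = true) :
    ancb a c = true := by
  induction c using Nat.strong_induction_on with
  | _ c ih =>
    by_cases hbc : c ≤ b
    · have := ancb_le h2
      have : b = c := by omega
      subst this; exact h1
    · have h2' := ancb_parent h2 (by omega)
      have hcpos : (c - 1) / 2 < c := by
        have := ancb_le h1; omega
      rw [ancb, if_neg (by have := ancb_le h1; omega)]
      exact ih _ hcpos h2'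

lemma ancb_parent_anc {a b : Nat} (h : ancb a b = true) :
    ancb ((a - 1) / 2) b = true :=
  ancb_trans (ancb_parent_self a) h

lemma ancb_total {a b c : Nat} (h1 : ancb a c = true) (h2 : ancb b c = true)
    (hab : a ≤ b) : ancb a b = true := by
  induction c using Nat.strong_induction_on with
  | _ c ih =>
    by_cases hbc : c ≤ b
    · have := ancb_le h2
      have : b = c := by omega
      subst this; exact h1
    · have hb' := ancb_parent h2 (by omega)
      have ha' : a ≤ c := ancb_le h1
      by_cases hac : a = c
      · omega
      · have h1' := ancb_parent h1 (by omega)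
        exact ih _ (by omega) h1' hb'

-- on the ancestor chain of q, a proper ancestor f has a "chain child" j with parent f
lemma ancb_chain_child {f q : Nat} (h : ancb f q = true) (hlt : f < q) :
    ∃ j, ancb j q = true ∧ f < j ∧ (j - 1) / 2 = f := by
  induction q using Nat.strong_induction_on with
  | _ q ih =>
    have hp := ancb_parent h hlt
    by_cases hf : f = (q - 1) / 2
    · exact ⟨q, ancb_self q, hlt, hf.symm⟩
    · have hfp : f < (q - 1) / 2 := by
        have := ancb_le hp; omega
      obtain ⟨j, hj1, hj2, hj3⟩ := ih ((q - 1) / 2) (by omega) hp hfp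
      exact ⟨j, ancb_trans hj1 (ancb_parent_self q), hj2, hj3⟩

-- ---- heap property ----
def HeapFrom (l : List (Int × Int)) (s : Nat) : Prop :=
  ∀ v, v < l.length → 1 ≤ v → s ≤ (v - 1) / 2 →
    pltb (hget l ((v - 1) / 2)) (hget l v) = false

lemma root_max {l : List (Int × Int)} (h : HeapFrom l 0) :
    ∀ j, j < l.length → pltb (hget l 0) (hget l j) = false := by
  intro j
  induction j using Nat.strong_induction_on with
  | _ j ih =>
    intro hj
    cases Nat.eq_zero_or_pos j with
    | inl h0 => subst h0; exact pltb_self _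
    | inr h1 =>
      have hedge := h j hj h1 (Nat.zero_le _)
      have hpar := ih ((j - 1) / 2) (by omega) (by omega)
      exact pltb_ff_trans hpar hedge

-- ---- phase 1: the _siftup_max while loop ----
lemma sul_spec (L : List (Int × Int)) (p0 : Nat) :
    ∀ (gas : Nat) (l : List (Int × Int)) (pos cp : Nat),
    L.length ≤ cp + gas →
    l.length = L.length → p0 ≤ pos → pos < L.length → cp = 2 * pos + 1 →
    ancb p0 pos = true →
    (∀ v, v < L.length → 1 ≤ v → p0 ≤ (v - 1) / 2 → v ≠ pos → (v - 1) / 2 ≠ pos →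
        pltb (hget l ((v - 1) / 2)) (hget l v) = false) →
    (p0 < pos → ∀ c, c < L.length → (c = 2 * pos + 1 ∨ c = 2 * pos + 2) →
        pltb (hget l ((pos - 1) / 2)) (hget l c) = false) →
    (∀ x, (↑(l.set pos x) : Multiset (Int × Int)) = ↑(L.set p0 x)) →
    (siftupLoop l L.length pos cp).1.length = L.length ∧
    p0 ≤ (siftupLoop l L.length pos cp).2 ∧
    (siftupLoop l L.length pos cp).2 < L.length ∧
    L.length ≤ 2 * (siftupLoop l L.length pos cp).2 + 1 ∧
    ancb p0 (siftupLoop l L.length pos cp).2 = true ∧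
    (∀ v, v < L.length → 1 ≤ v → p0 ≤ (v - 1) / 2 → v ≠ (siftupLoop l L.length pos cp).2 →
        (v - 1) / 2 ≠ (siftupLoop l L.length pos cp).2 →
        pltb (hget (siftupLoop l L.length pos cp).1 ((v - 1) / 2))
             (hget (siftupLoop l L.length pos cp).1 v) = false) ∧
    (∀ x, (↑((siftupLoop l L.length pos cp).1.set (siftupLoop l L.length pos cp).2 x) :
        Multiset (Int × Int)) = ↑(L.set p0 x)) := by
  intro gas
  induction gas with
  | zero =>
    intro l pos cp hgas hlen hp0 hpos hcp hanc hC4 hE hms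
    rw [siftupLoop, dif_neg (by omega)]
    exact ⟨hlen, hp0, hpos, by omega, hanc, hC4, hms⟩
  | succ g ih =>
    intro l pos cp hgas hlen hp0 hpos hcp hanc hC4 hE hms
    by_cases hcpm : cp < L.length
    · have key : ∀ c2 : Nat, cp ≤ c2 → c2 < L.length → (c2 = 2 * pos + 1 ∨ c2 = 2 * pos + 2) →
          (∀ o, o < L.length → (o = 2 * pos + 1 ∨ o = 2 * pos + 2) → o ≠ c2 →
             pltb (hget l c2) (hget l o) = false) →
          (siftupLoop (l.set pos (hget l c2)) L.length c2 (2 * c2 + 1)).1.length = L.length ∧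
          p0 ≤ (siftupLoop (l.set pos (hget l c2)) L.length c2 (2 * c2 + 1)).2 ∧
          (siftupLoop (l.set pos (hget l c2)) L.length c2 (2 * c2 + 1)).2 < L.length ∧
          L.length ≤ 2 * (siftupLoop (l.set pos (hget l c2)) L.length c2 (2 * c2 + 1)).2 + 1 ∧
          ancb p0 (siftupLoop (l.set pos (hget l c2)) L.length c2 (2 * c2 + 1)).2 = true ∧
          (∀ v, v < L.length → 1 ≤ v → p0 ≤ (v - 1) / 2 →
              v ≠ (siftupLoop (l.set pos (hget l c2)) L.length c2 (2 * c2 + 1)).2 →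
              (v - 1) / 2 ≠ (siftupLoop (l.set pos (hget l c2)) L.length c2 (2 * c2 + 1)).2 →
              pltb (hget (siftupLoop (l.set pos (hget l c2)) L.length c2 (2 * c2 + 1)).1 ((v - 1) / 2))
                   (hget (siftupLoop (l.set pos (hget l c2)) L.length c2 (2 * c2 + 1)).1 v) = false) ∧
          (∀ x, (↑((siftupLoop (l.set pos (hget l c2)) L.length c2 (2 * c2 + 1)).1.set
              (siftupLoop (l.set pos (hget l c2)) L.length c2 (2 * c2 + 1)).2 x) :
              Multiset (Int × Int)) = ↑(L.set p0 x)) := by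
        intro c2 hcpc2 hc2m hc2k hsib
        have hposc2 : pos < c2 := by omega
        refine ih (l.set pos (hget l c2)) c2 (2 * c2 + 1) (by omega) (by simp [hlen])
          (by omega) hc2m rfl (ancb_child hanc hc2k) ?_ ?_ ?_
        · -- edges not touching the new hole c2
          intro v hv h1 hpv hvne hpvne
          by_cases hvpos : v = pos
          · have hpvpos : (v - 1) / 2 < pos := by omega
            rw [hget_set_ne (by omega), hvpos, hget_set_self (by omega)]
            have hppos : p0 < pos := by omega
            exact hE hppos c2 hc2m hc2k
          · by_cases hpvpos : (v - 1) / 2 = pos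
            · have hvchild : v = 2 * pos + 1 ∨ v = 2 * pos + 2 := by omega
              rw [hpvpos, hget_set_self (by omega), hget_set_ne (Ne.symm hvpos)]
              exact hsib v hv hvchild hvne
            · rw [hget_set_ne (Ne.symm hpvpos), hget_set_ne (Ne.symm hvpos)]
              exact hC4 v hv h1 hpv hvpos hpvpos
        · -- the parent of the new hole dominates the hole's children
          intro _ c hc hck
          have hcc : (c2 - 1) / 2 = pos := by omega
          have hcpos : c ≠ pos := by omega
          rw [hcc, hget_set_self (by omega), hget_set_ne (Ne.symm hcpos)]
          have := hC4 c hc (by omega) (by omega) (by omega) (by omega)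
          rw [show (c - 1) / 2 = c2 from by omega] at this
          exact this
        · -- the multiset relation
          intro x
          ext b
          have e1 := congrArg (Multiset.count b)
            (ms_set (l := l.set pos (hget l c2)) (i := c2) (by simp [hlen]; omega) x)
          have e2 := congrArg (Multiset.count b) (ms_set (l := l) (i := pos) (by omega) (hget l c2))
          have e3 := congrArg (Multiset.count b) (hms x)
          have e4 := congrArg (Multiset.count b) (ms_set (l := l) (i := pos) (by omega) x)
          rw [hget_set_ne (by omega)] at e1
          simp only [Multiset.count_add, Multiset.count_singleton] at e1 e2 e3 e4 ⊢
          omega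
      have hstep : siftupLoop l L.length pos cp =
          (let c2 := if cp + 1 < L.length && !(pltb (hget l (cp + 1)) (hget l cp)) then cp + 1
                     else cp;
           siftupLoop (l.set pos (hget l c2)) L.length c2 (2 * c2 + 1)) := by
        rw [siftupLoop, dif_pos hcpm]
      by_cases hb : (cp + 1 < L.length && !(pltb (hget l (cp + 1)) (hget l cp))) = true
      · rw [hstep]
        simp only [hb, if_true]
        simp only [Bool.and_eq_true, decide_eq_true_eq, Bool.not_eq_true'] at hb
        refine key (cp + 1) (by omega) hb.1 (by omega) ?_
        intro o ho hok hone
        have : o = cp := by omega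
        subst this
        exact hb.2
      · rw [hstep]
        simp only [hb, if_false]
        refine key cp le_rfl hcpm (by omega) ?_
        intro o ho hok hone
        have : o = cp + 1 := by omega
        subst this
        simp only [Bool.and_eq_true, decide_eq_true_eq, Bool.not_eq_true'] at hb
        have : pltb (hget l (cp + 1)) (hget l cp) = true := by
          by_contra hcon
          exact hb ⟨by omega, by simpa using hcon⟩
        exact pltb_asymm this
    · rw [siftupLoop, dif_neg (by omega)]
      exact ⟨hlen, hp0, hpos, by omega, hanc, hC4, hms⟩

-- ---- phase 2: _siftdown_max ----
-- the while loop of _siftdown_max, by induction on pos (the hole climbs towards p0)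
lemma sdl_go (M : List (Int × Int)) (p0 q : Nat) (ni : Int × Int) (hq : q < M.length) :
    ∀ (gas : Nat) (l : List (Int × Int)) (pos : Nat), pos ≤ gas →
    l.length = M.length → p0 ≤ pos → ancb p0 pos = true → ancb pos q = true →
    (∀ j, j < M.length → ancb j q = true → pos < j → hget l j = hget M ((j - 1) / 2)) →
    (∀ j, j < M.length → (ancb j q = false ∨ j ≤ pos) → hget l j = hget M j) →
    (∀ j, j < M.length → ancb j q = true → pos < j → pltb (hget M ((j - 1) / 2)) ni = true) →
    (∀ x, (↑(l.set pos x) : Multiset (Int × Int)) = ↑(M.set q x)) →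
    (siftdownLoop l ni p0 pos).1.length = M.length ∧
    p0 ≤ (siftdownLoop l ni p0 pos).2 ∧
    ancb p0 (siftdownLoop l ni p0 pos).2 = true ∧
    ancb (siftdownLoop l ni p0 pos).2 q = true ∧
    (∀ j, j < M.length → ancb j q = true → (siftdownLoop l ni p0 pos).2 < j →
        hget (siftdownLoop l ni p0 pos).1 j = hget M ((j - 1) / 2)) ∧
    (∀ j, j < M.length → (ancb j q = false ∨ j ≤ (siftdownLoop l ni p0 pos).2) →
        hget (siftdownLoop l ni p0 pos).1 j = hget M j) ∧
    (∀ j, j < M.length → ancb j q = true → (siftdownLoop l ni p0 pos).2 < j →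
        pltb (hget M ((j - 1) / 2)) ni = true) ∧
    (∀ x, (↑((siftdownLoop l ni p0 pos).1.set (siftdownLoop l ni p0 pos).2 x) :
        Multiset (Int × Int)) = ↑(M.set q x)) ∧
    ((siftdownLoop l ni p0 pos).2 = p0 ∨
        pltb (hget M (((siftdownLoop l ni p0 pos).2 - 1) / 2)) ni = false) := by
  intro gas
  induction gas with
  | zero =>
    intro l pos hgas hlen hp0 hanc0 hancq hG4 hG5 hG6 hms
    have hpos0 : pos = 0 := by omega
    subst hpos0
    have hp00 : p0 = 0 := by omega
    rw [siftdownLoop, dif_neg (by omega)]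
    exact ⟨hlen, by omega, hanc0, hancq, hG4, hG5, hG6, hms, Or.inl hp00.symm⟩
  | succ g ih =>
    intro l pos hgas hlen hp0 hanc0 hancq hG4 hG5 hG6 hms
    rw [siftdownLoop]
    by_cases hpp : p0 < pos
    · rw [dif_pos hpp]
      have hposm : pos < M.length := by
        have := ancb_le hancq; omega
      set pp := (pos - 1) / 2 with hppdef
      have hppos : pp < pos := by omega
      have hparval : hget l pp = hget M pp := hG5 pp (by omega) (Or.inr (by omega))
      by_cases hc : pltb (hget l pp) ni = true
      · rw [if_pos hc]
        -- one shift step: l[pos] := parent, hole moves to pp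
        have hset_len : (l.set pos (hget l pp)).length = M.length := by simp [hlen]
        have hancp0pp : ancb p0 pp = true := ancb_parent hanc0 hpp
        have hancppq : ancb pp q = true := ancb_trans (ancb_parent_self pos) hancq
        -- no chain element strictly between pp and pos
        have hchain_gap : ∀ j, ancb j q = true → pp < j → j ≠ pos → pos < j := by
          intro j hj hj1 hj2
          by_contra hj3
          have hjpos : j < pos := by omega
          have h1 : ancb j pos = true := ancb_total hj hancq (by omega)
          have h2 := ancb_parent h1 hjpos
          have := ancb_le h2
          omega
        refine ih (l.set pos (hget l pp)) pp (by omega) hset_len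
          (ancb_le hancp0pp) hancp0pp hancppq ?_ ?_ ?_ ?_
        · intro j hj hjq hjpp
          by_cases hjpos : j = pos
          · subst hjpos
            rw [hget_set_self (by omega), hparval]
          · rw [hget_set_ne (Ne.symm hjpos)]
            exact hG4 j hj hjq (hchain_gap j hjq hjpp hjpos)
        · intro j hj hcond
          have hjpos : j ≠ pos := by
            rintro rfl
            rcases hcond with h | h
            · rw [hancq] at h; cases h
            · omega
          rw [hget_set_ne (Ne.symm hjpos)]
          refine hG5 j hj ?_
          rcases hcond with h | h
          · exact Or.inl h
          · exact Or.inr (by omega)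
        · intro j hj hjq hjpp
          by_cases hjpos : j = pos
          · subst hjpos
            rw [← hparval]; exact hc
          · exact hG6 j hj hjq (hchain_gap j hjq hjpp hjpos)
        · intro x
          ext b
          have e1 := congrArg (Multiset.count b)
            (ms_set (l := l.set pos (hget l pp)) (i := pp) (by omega) x)
          have e2 := congrArg (Multiset.count b) (ms_set (l := l) (i := pos) (by omega) (hget l pp))
          have e3 := congrArg (Multiset.count b) (hms x)
          have e4 := congrArg (Multiset.count b) (ms_set (l := l) (i := pos) (by omega) x)
          rw [hget_set_ne (by omega)] at e1
          simp only [Multiset.count_add, Multiset.count_singleton] at e1 e2 e3 e4 ⊢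
          omega
      · rw [if_neg hc]
        refine ⟨hlen, hp0, hanc0, hancq, hG4, hG5, hG6, hms, Or.inr ?_⟩
        rw [← hparval]
        exact Bool.eq_false_iff.mpr hc
    · rw [dif_neg hpp]
      have : pos = p0 := by omega
      exact ⟨hlen, hp0, hanc0, hancq, hG4, hG5, hG6, hms, Or.inl this⟩

lemma sdl_final (M : List (Int × Int)) (p0 q f : Nat) (ni : Int × Int) (l2 : List (Int × Int))
    (hm : l2.length = M.length) (hq : q < M.length) (hleaf : M.length ≤ 2 * q + 1)
    (hp0f : p0 ≤ f) (hfq : ancb f q = true) (hpf : ancb p0 f = true)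
    (hG4 : ∀ j, j < M.length → ancb j q = true → f < j → hget l2 j = hget M ((j - 1) / 2))
    (hG5 : ∀ j, j < M.length → (ancb j q = false ∨ j ≤ f) → hget l2 j = hget M j)
    (hG6 : ∀ j, j < M.length → ancb j q = true → f < j → pltb (hget M ((j - 1) / 2)) ni = true)
    (hstop : f = p0 ∨ pltb (hget M ((f - 1) / 2)) ni = false)
    (hex : ∀ v, v < M.length → 1 ≤ v → p0 ≤ (v - 1) / 2 → v ≠ q →
        pltb (hget M ((v - 1) / 2)) (hget M v) = false) :
    HeapFrom (l2.set f ni) p0 := by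
  have hfq' : f ≤ q := ancb_le hfq
  have hfm : f < M.length := by omega
  intro v hv h1v hp0u
  set u := (v - 1) / 2 with hu
  have huv : u < v := by omega
  rw [List.length_set, hm] at hv
  have hum : u < M.length := by omega
  have hgRf : hget (l2.set f ni) f = ni := hget_set_self (by omega) ni
  by_cases hvf : v = f
  · -- edge into the insertion point
    have huf : u ≠ f := by omega
    rw [hvf, hgRf, hget_set_ne (Ne.symm huf), hG5 u hum (Or.inr (by omega))]
    rcases hstop with h | h
    · omega
    · have huf2 : u = (f - 1) / 2 := by omega
      rw [huf2]; exact h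
  · have hvR : hget (l2.set f ni) v = hget l2 v := hget_set_ne (Ne.symm hvf) ni
    by_cases hvmod : ancb v q = true ∧ f < v
    · -- v lies on the shifted chain: its value is old M[u]
      have hvq : v ≤ q := ancb_le hvmod.1
      have hancfv : ancb f v = true := ancb_total hfq hvmod.1 (by omega)
      have hancfu : ancb f u = true := ancb_parent hancfv hvmod.2
      have hfu : f ≤ u := ancb_le hancfu
      rw [hvR, hG4 v (by omega) hvmod.1 hvmod.2]
      by_cases huf : u = f
      · rw [huf, hgRf]
        exact pltb_asymm (hG6 v (by omega) hvmod.1 hvmod.2)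
      · have hfu' : f < u := by omega
        have hancuq : ancb u q = true := ancb_parent_anc hvmod.1
        rw [hget_set_ne (Ne.symm huf), hG4 u hum hancuq hfu']
        have hancp0u : ancb p0 u = true := ancb_trans hpf hancfu
        have h1u : 1 ≤ u := by omega
        have hupar : p0 ≤ (u - 1) / 2 := ancb_le (ancb_parent hancp0u (by omega))
        exact hex u hum h1u hupar (by omega)
    · -- v keeps its original value M[v]
      have hvbase : ancb v q = false ∨ v ≤ f := by
        by_cases h : ancb v q = true
        · right; push_neg at hvmod; have := hvmod h; omega
        · left; exact Bool.eq_false_iff.mpr h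
      have hvq : v ≠ q := by
        rintro rfl
        rcases hvbase with h | h
        · rw [ancb_self] at h; cases h
        · omega
      rw [hvR, hG5 v (by omega) hvbase]
      by_cases huf : u = f
      · -- v is an off-chain child of the insertion point
        subst huf
        have hfltq : u < q := by
          rcases Nat.lt_or_ge u q with h | h
          · exact h
          · have : u = q := by omega
            omega
        obtain ⟨j, hjq, hfj, hjpar⟩ := ancb_chain_child hfq hfltq
        have hjm : j < M.length := by have := ancb_le hjq; omega
        have h6 := hG6 j hjm hjq hfj
        rw [hjpar] at h6
        have hx := hex v (by omega) h1v hp0u hvq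
        rw [hgRf]
        exact pltb_le_lt hx h6
      · by_cases humod : ancb u q = true ∧ f < u
        · -- u is on the shifted chain
          have huq : u ≠ q := by
            rintro rfl
            omega
          have hancfu : ancb f u = true := ancb_total hfq humod.1 (by omega)
          have hancp0u : ancb p0 u = true := ancb_trans hpf hancfu
          rw [hget_set_ne (Ne.symm huf), hG4 u hum humod.1 humod.2]
          have h1u : 1 ≤ u := by omega
          have hupar : p0 ≤ (u - 1) / 2 := ancb_le (ancb_parent hancp0u (by omega))
          have e1 := hex u hum h1u hupar huq
          have e2 := hex v (by omega) h1v hp0u hvq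
          exact pltb_ff_trans e1 e2
        · -- both endpoints keep their original values
          have hubase : ancb u q = false ∨ u ≤ f := by
            by_cases h : ancb u q = true
            · right; push_neg at humod; have := humod h; omega
            · left; exact Bool.eq_false_iff.mpr h
          rw [hget_set_ne (Ne.symm huf), hG5 u hum hubase]
          exact hex v (by omega) h1v hp0u hvq

lemma sdl_spec (M : List (Int × Int)) (p0 q : Nat) (hq : q < M.length) (hpq : p0 ≤ q)
    (hanc : ancb p0 q = true) (hleaf : M.length ≤ 2 * q + 1)
    (hex : ∀ v, v < M.length → 1 ≤ v → p0 ≤ (v - 1) / 2 → v ≠ q →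
        pltb (hget M ((v - 1) / 2)) (hget M v) = false) :
    (siftdownMax M p0 q).length = M.length ∧
    (↑(siftdownMax M p0 q) : Multiset (Int × Int)) = ↑M ∧
    HeapFrom (siftdownMax M p0 q) p0 := by
  have hgo := sdl_go M p0 q (hget M q) hq q M q le_rfl rfl hpq hanc (ancb_self q)
    (by intro j hj hjq hlt; have := ancb_le hjq; omega)
    (by intro j _ _; rfl)
    (by intro j hj hjq hlt; have := ancb_le hjq; omega)
    (by intro x; rfl)
  obtain ⟨g1, g2, g3, g4, g5, g6, g7, g8, g9⟩ := hgo
  unfold siftdownMax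
  refine ⟨by simp [g1], ?_, ?_⟩
  · have := g8 (hget M q)
    rw [this, set_hget_self hq]
  · exact sdl_final M p0 q (siftdownLoop M (hget M q) p0 q).2 (hget M q)
      (siftdownLoop M (hget M q) p0 q).1 g1 hq hleaf g2 g4 g3 g5 g6 g7 g9 hex

-- ---- _siftup_max correctness ----
lemma sup_spec (L : List (Int × Int)) (p0 : Nat) (hp : p0 < L.length)
    (hH : HeapFrom L (p0 + 1)) :
    (siftupMax L p0).length = L.length ∧
    (↑(siftupMax L p0) : Multiset (Int × Int)) = ↑L ∧
    HeapFrom (siftupMax L p0) p0 := by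
  have hsul := sul_spec L p0 L.length L p0 (2 * p0 + 1) (by omega) rfl le_rfl hp rfl
    (ancb_self p0)
    (by
      intro v hv h1 hpv hvne hpvne
      exact hH v hv h1 (by omega))
    (by intro h; omega)
    (by intro x; rfl)
  obtain ⟨s1, s2, s3, s4, s5, s6, s7⟩ := hsul
  set r := siftupLoop L L.length p0 (2 * p0 + 1) with hr
  set ni := hget L p0 with hni
  set h2 := r.1.set r.2 ni with hh2
  have hh2len : h2.length = L.length := by simp [hh2, s1]
  have hex2 : ∀ v, v < h2.length → 1 ≤ v → p0 ≤ (v - 1) / 2 → v ≠ r.2 →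
      pltb (hget h2 ((v - 1) / 2)) (hget h2 v) = false := by
    intro v hv h1 hpv hvne
    rw [hh2len] at hv
    have hpvne : (v - 1) / 2 ≠ r.2 := by omega
    rw [hh2, hget_set_ne (Ne.symm hpvne), hget_set_ne (Ne.symm hvne)]
    exact s6 v hv h1 hpv hvne hpvne
  have hms2 : (↑h2 : Multiset (Int × Int)) = ↑L := by
    rw [hh2, s7 ni, hni, set_hget_self hp]
  have hsdl := sdl_spec h2 p0 r.2 (by omega) s2 s5 (by omega) hex2
  have hgoal : siftupMax L p0 = siftdownMax h2 p0 r.2 := rfl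
  rw [hgoal]
  have hl1 := hsdl.1
  refine ⟨by omega, ?_, hsdl.2.2⟩
  · rw [hsdl.2.1, hms2]

-- ---- _heapify_max correctness ----
lemma heapify_aux :
    ∀ (i : Nat) (l : List (Int × Int)), 2 * i ≤ l.length → HeapFrom l i →
    ((List.range i).reverse.foldl (fun h j => siftupMax h j) l).length = l.length ∧
    (↑((List.range i).reverse.foldl (fun h j => siftupMax h j) l) : Multiset (Int × Int)) = ↑l ∧
    HeapFrom ((List.range i).reverse.foldl (fun h j => siftupMax h j) l) 0 := by
  intro i
  induction i with
  | zero =>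
    intro l _ hH
    exact ⟨rfl, rfl, hH⟩
  | succ i ih =>
    intro l hi hH
    have him : i < l.length := by omega
    have hsup := sup_spec l i him hH
    have hstep : (List.range (i + 1)).reverse.foldl (fun h j => siftupMax h j) l =
        (List.range i).reverse.foldl (fun h j => siftupMax h j) (siftupMax l i) := by
      rw [List.range_succ, List.reverse_append]
      rfl
    rw [hstep]
    have hlen := hsup.1
    have hih := ih (siftupMax l i) (by omega) hsup.2.2
    have hl1 := hih.1
    exact ⟨by omega, by rw [hih.2.1, hsup.2.1], hih.2.2⟩

lemma heapify_spec (l : List (Int × Int)) :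
    (heapifyMax l).length = l.length ∧
    (↑(heapifyMax l) : Multiset (Int × Int)) = ↑l ∧
    HeapFrom (heapifyMax l) 0 := by
  unfold heapifyMax
  exact heapify_aux (l.length / 2) l (by omega)
    (by
      intro v hv h1 hpv
      omega)

-- ---- the selection loop ----
def fstMS (h : List (Int × Int)) : Multiset Int := ↑(h.map Prod.fst)

lemma fst_le_top {heap : List (Int × Int)} (h : HeapFrom heap 0) :
    ∀ x ∈ fstMS heap, x ≤ (hget heap 0).1 := by
  intro x hx
  rw [fstMS, Multiset.mem_coe, List.mem_map] at hx
  obtain ⟨p, hp, rfl⟩ := hx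
  obtain ⟨j, hj, rfl⟩ := List.getElem_of_mem hp
  have hgj : hget heap j = heap[j] := by
    simp [hget, List.getElem?_eq_getElem hj]
  have := root_max h j hj
  rw [hgj, pltb_false_iff] at this
  omega

lemma top_mem {heap : List (Int × Int)} (hk : 0 < heap.length) :
    (hget heap 0).1 ∈ fstMS heap := by
  rw [fstMS, Multiset.mem_coe, List.mem_map]
  exact ⟨hget heap 0, hget_mem hk, rfl⟩

lemma nsloop_spec (k : Nat) (hk : 0 < k) :
    ∀ (rest : List Int) (heap : List (Int × Int)) (top order : Int) (M : Multiset Int),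
    heap.length = k → HeapFrom heap 0 → top = (hget heap 0).1 →
    fstMS heap ≤ M →
    (∀ x ∈ fstMS heap, ∀ y ∈ M - fstMS heap, x ≤ y) →
    (nsmallestLoop rest heap top order).length = k ∧
    HeapFrom (nsmallestLoop rest heap top order) 0 ∧
    fstMS (nsmallestLoop rest heap top order) ≤ M + ↑rest ∧
    (∀ x ∈ fstMS (nsmallestLoop rest heap top order),
       ∀ y ∈ (M + ↑rest) - fstMS (nsmallestLoop rest heap top order), x ≤ y) := by
  intro rest heap top order M
  induction rest generalizing heap top order M with
  | nil =>
    intro hlen hH htop hle hdom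
    simp only [nsmallestLoop]
    exact ⟨hlen, hH, by simpa using hle, by simpa using hdom⟩
  | cons e rest' ih =>
    intro hlen hH htop hle hdom
    have hklen : 0 < heap.length := by omega
    have hrest : (↑(e :: rest') : Multiset Int) = {e} + ↑rest' := by
      rw [Multiset.singleton_add]; rfl
    have hMre : M + ↑(e :: rest') = (M + {e}) + ↑rest' := by
      rw [hrest, add_assoc]
    simp only [nsmallestLoop]
    by_cases hlt : e < top
    · rw [if_pos hlt]
      set it : Int × Int := (e, order) with hit
      have hH1 : HeapFrom (heap.set 0 it) 1 := by
        intro v hv h1 hpv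
        rw [List.length_set] at hv
        rw [hget_set_ne (by omega), hget_set_ne (by omega)]
        exact hH v hv h1 (by omega)
      have hsup := sup_spec (heap.set 0 it) 0 (by simp [hklen]) hH1
      set h2 := heapreplaceMax heap it with hh2
      have hh2eq : h2 = siftupMax (heap.set 0 it) 0 := rfl
      have hlen2 : h2.length = k := by rw [hh2eq, hsup.1]; simp [hlen]
      have hH2 : HeapFrom h2 0 := hh2eq ▸ hsup.2.2
      have hmseq : (↑h2 : Multiset (Int × Int)) = ↑(heap.set 0 it) := hh2eq ▸ hsup.2.1
      -- fst-multiset bookkeeping: fstMS h2 + {top} = fstMS heap + {e}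
      have E : fstMS h2 + {top} = fstMS heap + {e} := by
        have e1 := congrArg (Multiset.map Prod.fst) (ms_set (l := heap) (i := 0) hklen it)
        rw [Multiset.map_add, Multiset.map_add, Multiset.map_singleton,
          Multiset.map_singleton, ← hmseq] at e1
        simp only [fstMS]
        simpa [htop, hit] using e1
      obtain ⟨R, hR⟩ := Multiset.le_iff_exists_add.mp hle
      have hMe : M + {e} = fstMS h2 + ({top} + R) := by
        rw [hR]
        calc fstMS heap + R + {e} = (fstMS heap + {e}) + R := by abel
        _ = (fstMS h2 + {top}) + R := by rw [E]
        _ = fstMS h2 + ({top} + R) := by abel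
      have htopS : top ∈ fstMS heap := htop ▸ top_mem hklen
      have hxle : ∀ x ∈ fstMS heap, x ≤ top := by
        intro x hx; exact htop ▸ fst_le_top hH x hx
      have hle2 : fstMS h2 ≤ M + {e} := by
        rw [hMe]; exact Multiset.le_add_right _ _
      have hsub : M + {e} - fstMS h2 = {top} + R := by
        rw [hMe]; exact add_tsub_cancel_left _ _
      have hdomR : ∀ x ∈ fstMS heap, ∀ y ∈ R, x ≤ y := by
        intro x hx y hy
        refine hdom x hx y ?_
        rw [hR, add_tsub_cancel_left (fstMS heap)]
        exact hy
      have hxmem : ∀ x ∈ fstMS h2, x ∈ fstMS heap ∨ x = e := by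
        intro x hx
        have : x ∈ fstMS heap + {e} := by
          rw [← E]
          exact Multiset.mem_of_le (Multiset.le_add_right _ _) hx
        rcases Multiset.mem_add.mp this with h | h
        · left; exact h
        · right; exact Multiset.mem_singleton.mp h
      have hdom2 : ∀ x ∈ fstMS h2, ∀ y ∈ (M + {e}) - fstMS h2, x ≤ y := by
        intro x hx y hy
        rw [hsub] at hy
        have hxtop : x ≤ top := by
          rcases hxmem x hx with h | rfl
          · exact hxle x h
          · omega
        rcases Multiset.mem_add.mp hy with h | h
        · rw [Multiset.mem_singleton.mp h]
          exact hxtop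
        · rcases hxmem x hx with hxS | rfl
          · exact hdomR x hxS y h
          · have := hdomR top htopS y h
            omega
      rw [hMre]
      exact ih h2 (hget h2 0).1 (order + 1) (M + {e}) hlen2 hH2 rfl hle2 hdom2
    · rw [if_neg hlt]
      obtain ⟨R, hR⟩ := Multiset.le_iff_exists_add.mp hle
      have hle2 : fstMS heap ≤ M + {e} := le_trans hle (Multiset.le_add_right M {e})
      have hsub : (M + {e}) - fstMS heap = R + {e} := by
        rw [hR, add_assoc]
        exact add_tsub_cancel_left _ _
      have hdom2 : ∀ x ∈ fstMS heap, ∀ y ∈ (M + {e}) - fstMS heap, x ≤ y := by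
        intro x hx y hy
        rw [hsub] at hy
        rcases Multiset.mem_add.mp hy with h | h
        · refine hdom x hx y ?_
          rw [hR, add_tsub_cancel_left (fstMS heap)]
          exact h
        · rw [Multiset.mem_singleton.mp h]
          have h1 := fst_le_top hH x hx
          rw [← htop] at h1
          omega
      rw [hMre]
      exact ih heap top order (M + {e}) hlen hH htop hle2 hdom2

-- ---- "the n smallest" characterisation ----
lemma take_smallest :
    ∀ (t : List Int) (S : Multiset Int), t.Pairwise (· ≤ ·) → S ≤ ↑t →
    (∀ x ∈ S, ∀ y ∈ (↑t - S : Multiset Int), x ≤ y) →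
    (↑(t.take (Multiset.card S)) : Multiset Int) = S := by
  intro t
  induction t with
  | nil =>
    intro S _ hle _
    have : S = 0 := Multiset.le_zero.mp (by simpa using hle)
    subst this; simp
  | cons a t' ih =>
    intro S hpw hle hdom
    by_cases hS : S = 0
    · subst hS; simp
    · obtain ⟨x, hx⟩ := Multiset.exists_mem_of_ne_zero hS
      have hcoe : (↑(a :: t') : Multiset Int) = a ::ₘ ↑t' := rfl
      have haS : a ∈ S := by
        by_contra ha
        have hxa : x ≤ a := by
          apply hdom x hx
          rw [← Multiset.count_pos, Multiset.count_sub, hcoe]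
          have : Multiset.count a S = 0 := Multiset.count_eq_zero_of_notMem ha
          rw [this]
          simp
        have hax : a ≤ x := by
          have hxt : x ∈ (↑(a :: t') : Multiset Int) := Multiset.mem_of_le hle hx
          rw [Multiset.mem_coe, List.mem_cons] at hxt
          rcases hxt with rfl | hxt
          · exact le_refl x
          · exact List.rel_of_pairwise_cons hpw hxt
        have : x = a := le_antisymm hxa hax
        subst this; exact ha hx
      set S' := S.erase a with hS'
      have hSa : S = a ::ₘ S' := (Multiset.cons_erase haS).symm
      have hcount : ∀ b, Multiset.count b S = Multiset.count b S' + (if b = a then 1 else 0) := by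
        intro b
        rw [hSa, Multiset.count_cons]
      have hle' : S' ≤ ↑t' := by
        rw [Multiset.le_iff_count]
        intro b
        have h1 := Multiset.le_iff_count.mp hle b
        rw [hcoe, Multiset.count_cons] at h1
        have := hcount b
        omega
      have hdiff : (↑t' - S' : Multiset Int) = (↑(a :: t') - S : Multiset Int) := by
        ext b
        rw [Multiset.count_sub, Multiset.count_sub, hcoe, Multiset.count_cons]
        have := hcount b
        omega
      have hdom' : ∀ x ∈ S', ∀ y ∈ (↑t' - S' : Multiset Int), x ≤ y := by
        intro x hxS y hy
        apply hdom x (Multiset.mem_of_le (Multiset.erase_le a S) hxS)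
        rw [← hdiff]; exact hy
      have hcard : Multiset.card S = Multiset.card S' + 1 := by
        rw [hSa]; simp
      have hih := ih S' (List.Pairwise.of_cons hpw) hle' hdom'
      rw [hcard]
      simp only [List.take_succ_cons]
      rw [show (↑(a :: t'.take (Multiset.card S')) : Multiset Int)
            = a ::ₘ ↑(t'.take (Multiset.card S')) from rfl, hih, ← hSa]

-- ---- result.sort() yields pairs in nondecreasing lexicographic order ----
lemma insertBy_pw (bef : (Int × Int) → (Int × Int) → Bool)
    (hbe : ∀ a b, bef a b = pltb a b) (x : Int × Int) :
    ∀ acc, List.Pairwise (fun a b => pltb b a = false) acc →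
    List.Pairwise (fun a b => pltb b a = false) (PySem.List.insertBy bef x acc) := by
  intro acc
  induction acc with
  | nil => intro _; simp [PySem.List.insertBy]
  | cons y ys ih =>
    intro hp
    rw [PySem.List.insertBy]
    rw [List.pairwise_cons] at hp
    obtain ⟨hy, hys⟩ := hp
    by_cases hxy : bef x y = true
    · rw [if_pos hxy, hbe] at *
      refine List.Pairwise.cons ?_ (List.Pairwise.cons hy hys)
      intro z hz
      rcases List.mem_cons.mp hz with rfl | hz
      · exact pltb_asymm hxy
      · have h1 := hy z hz
        rw [pltb_true_iff] at hxy
        rw [pltb_false_iff] at h1 ⊢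
        omega
    · rw [if_neg hxy]
      refine List.Pairwise.cons ?_ (ih hys)
      intro z hz
      rcases (PySem.List.mem_insertBy bef x z ys).mp hz with rfl | hz
      · rw [hbe] at hxy
        exact Bool.eq_false_iff.mpr hxy
      · exact hy z hz

lemma foldl_insertBy_pw (bef : (Int × Int) → (Int × Int) → Bool)
    (hbe : ∀ a b, bef a b = pltb a b) :
    ∀ (xs acc : List (Int × Int)), List.Pairwise (fun a b => pltb b a = false) acc →
    List.Pairwise (fun a b => pltb b a = false)
      (List.foldl (fun acc x => PySem.List.insertBy bef x acc) acc xs) := by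
  intro xs
  induction xs with
  | nil => intro acc h; exact h
  | cons x xs ih =>
    intro acc h
    exact ih _ (insertBy_pw bef hbe x acc h)

lemma sorted2_pairwise_fst (xs : List (Int × Int)) :
    ((PySem.List.sorted2 xs Prod.fst Prod.snd).map Prod.fst).Pairwise (· ≤ ·) := by
  have h : List.Pairwise (fun a b => pltb b a = false)
      (PySem.List.sorted2 xs Prod.fst Prod.snd) := by
    unfold PySem.List.sorted2
    simp only [Bool.false_eq_true, if_false]
    apply foldl_insertBy_pw
    · intro a b
      simp only [pltb]
      rcases lt_trichotomy a.1 b.1 with h | h | h <;>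
        simp [h, not_lt_of_gt] <;> omega
    · exact List.Pairwise.nil
  refine List.Pairwise.map _ ?_ h
  intro a b hab
  rw [pltb_false_iff] at hab
  omega

-- ---- the n = 1 branch ----
lemma min_eq_take_one (l : List Int) :
    (match PySem.List.min? l (fun x => x) with
      | none => ([] : List Int)
      | some r => [r]) = (PySem.List.sorted l (fun x => x)).take 1 := by
  rcases hs : PySem.List.sorted l (fun x => x) with _ | ⟨m, t⟩
  · have hl : l = [] := (PySem.List.sorted_eq_nil_iff _ _ _).mp hs
    subst hl
    simp [PySem.List.min?]
  · have hl : l ≠ [] := by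
      intro h
      rw [← PySem.List.sorted_eq_nil_iff (key := fun x : Int => x) (rev := false)] at h
      rw [hs] at h; cases h
    rcases hm : PySem.List.min? l (fun x => x) with _ | r
    · exact absurd ((PySem.List.min?_eq_none_iff _ _).mp hm) hl
    · have hrmem : r ∈ l := PySem.List.min?_mem hm
      have hrmin : ∀ y ∈ l, r ≤ y := by
        have := PySem.List.min?_isMin (κ := Int) hm
        simpa using this
      have hmmem : m ∈ l := by
        have : m ∈ PySem.List.sorted l (fun x => x) := by rw [hs]; simp
        rwa [PySem.List.mem_sorted] at this
      have hmmin : m ≤ r := by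
        have := PySem.List.key_head_sorted_le l (fun x => x) hs
        simpa using this r hrmem
      have : r = m := le_antisymm (hrmin m hmmem) hmmin
      subst this
      simp

-- ---- main branch ----
lemma main_branch (l : List Int) (k : Nat) (hk : 0 < k) (hlt : k < l.length) (order : Int) :
    ((PySem.List.sorted2
        (nsmallestLoop (l.drop k)
          (heapifyMax ((l.take k).zipIdx.map (fun p => (p.1, (p.2 : Int)))))
          (hget (heapifyMax ((l.take k).zipIdx.map (fun p => (p.1, (p.2 : Int))))) 0).1
          order)
        Prod.fst Prod.snd).map Prod.fst) =
    (PySem.List.sorted l (fun x => x)).take k := by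
  set R0 : List (Int × Int) := (l.take k).zipIdx.map (fun p => (p.1, (p.2 : Int))) with hR0
  have hR0len : R0.length = k := by
    simp [hR0, List.length_take]
    omega
  have hmapfst : R0.map Prod.fst = l.take k := by
    rw [hR0, List.map_map]
    exact List.zipIdx_map_fst 0 (l.take k)
  obtain ⟨hh0len, hh0ms, hh0H⟩ := heapify_spec R0
  set h0 := heapifyMax R0 with hh0
  have hfst0 : fstMS h0 = ↑(l.take k) := by
    rw [fstMS, ← Multiset.map_coe, hh0ms, Multiset.map_coe, hmapfst]
  obtain ⟨L1, L2, L3, L4⟩ := nsloop_spec k hk (l.drop k) h0 (hget h0 0).1 order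
    (↑(l.take k)) (by omega) hh0H rfl (le_of_eq hfst0)
    (by
      intro x hx y hy
      rw [hfst0, tsub_self] at hy
      simp at hy)
  set h2 := nsmallestLoop (l.drop k) h0 (hget h0 0).1 order with hh2
  have hM : (↑(l.take k) : Multiset Int) + ↑(l.drop k) = ↑l := by
    rw [show ((l : List Int) : Multiset Int) = ↑(l.take k ++ l.drop k) by rw [List.take_append_drop]]
    exact (Multiset.coe_add _ _).symm
  rw [hM] at L3 L4
  set t := PySem.List.sorted l (fun x => x) with ht
  have htl : (↑t : Multiset Int) = ↑l :=
    Multiset.coe_eq_coe.mpr (PySem.List.sorted_perm l (fun x => x) false)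
  have htpw : t.Pairwise (· ≤ ·) := PySem.List.sorted_pairwise l (fun x => x)
  have hcard : Multiset.card (fstMS h2) = k := by
    rw [fstMS, Multiset.coe_card, List.length_map, L1]
  have hts := take_smallest t (fstMS h2) htpw (htl ▸ L3)
    (by
      intro x hx y hy
      rw [htl] at hy
      exact L4 x hx y hy)
  rw [hcard] at hts
  have hperm : ((PySem.List.sorted2 h2 Prod.fst Prod.snd).map Prod.fst).Perm (t.take k) := by
    rw [← Multiset.coe_eq_coe, hts, fstMS]
    exact Multiset.coe_eq_coe.mpr
      (List.Perm.map Prod.fst (PySem.List.sorted2_perm h2 Prod.fst Prod.snd false))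
  exact List.eq_of_perm_of_sorted
    (fun a b _ _ h1 h2 => le_antisymm h1 h2)
    (sorted2_pairwise_fst h2)
    (List.Pairwise.sublist (List.take_sublist k t) htpw)
    hperm

-- ===== VERDICT (by name: the statement is the Claim_ definition above) =====
theorem nsmallest_spec : Claim_equal_nsmallest := by
  intro n l _
  unfold Spec_nsmallest nsmallest nsmallest_alt
  by_cases h1 : n = 1
  · subst h1
    rw [if_pos rfl, if_neg (by omega)]
    rw [PySem.List.slice_to _ (by omega : (0 : Int) ≤ 1)]
    simpa using min_eq_take_one l
  · rw [if_neg h1]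
    by_cases h2 : (l.length : Int) ≤ n
    · rw [if_pos h2]
      by_cases h3 : n ≤ 0
      · have hl : l = [] := by
          have : l.length = 0 := by omega
          simpa using this
        subst hl
        rw [if_pos h3]
        have hs : PySem.List.sorted ([] : List Int) (fun x => x) = [] :=
          (PySem.List.sorted_eq_nil_iff _ _ _).mpr rfl
        rw [hs]
        simp [PySem.List.slice]
      · rw [if_neg h3]
    · rw [if_neg h2]
      by_cases h3 : n ≤ 0
      · rw [if_pos h3]
        have hk0 : n.toNat = 0 := by omega
        simp [hk0]
      · rw [if_neg h3]
        have hk : 0 < n.toNat := by omega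
        have h2' : n < (l.length : Int) := by omega
        have hkl : n.toNat < l.length := by omega
        rw [PySem.List.slice_to _ (by omega : (0 : Int) ≤ n)]
        have hres : ((l.take n.toNat).zipIdx.map (fun p => (p.1, (p.2 : Int)))) ≠ [] := by
          intro h
          have := congrArg List.length h
          simp only [List.length_map, List.length_zipIdx, List.length_take,
            List.length_nil] at this
          omega
        rw [if_neg hres]
        exact main_branch l n.toNat hk hkl n
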